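-- pv_equiv track=rewrite | github.com/powenn/Kata_solution | Python/Kata.py | remove_every_other
-- ===== SOURCE A (Python) =====
-- def remove_every_other(my_list):
--     index = 0
--     new_list = []
--     for item in my_list:
--         if index % 2 == 0:
--             new_list.append(my_list[index])
--         index += 1
--     return new_list
-- ===== SOURCE B (Python) =====
-- def remove_every_other(my_list):
--     # idiomatic: even-index extraction as a single step slice
--     return list(my_list[::2])
-- ===== Notes on version B (the rewrite author's own statement) =====
-- stated objective: idiomatic
-- what changed: Replaces the explicit index-counter loop with parity test and repeated indexing by a single step slice my_list[::2].
import Mathlib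
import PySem

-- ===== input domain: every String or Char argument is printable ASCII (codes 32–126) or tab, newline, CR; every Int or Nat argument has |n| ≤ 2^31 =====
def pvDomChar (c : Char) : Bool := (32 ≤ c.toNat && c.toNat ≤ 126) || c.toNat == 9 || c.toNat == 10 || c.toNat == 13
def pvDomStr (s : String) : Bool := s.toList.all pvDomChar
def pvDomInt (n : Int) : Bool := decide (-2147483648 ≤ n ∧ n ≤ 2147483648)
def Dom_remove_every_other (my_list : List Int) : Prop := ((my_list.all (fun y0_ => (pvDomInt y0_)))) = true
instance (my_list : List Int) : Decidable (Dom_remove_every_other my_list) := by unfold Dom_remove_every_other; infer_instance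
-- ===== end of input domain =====

-- ===== PORT A =====
-- Port of A: fold over the list with state (index, new_list); appends my_list[index]
-- via pyGetD (the index is always in range, so the default 0 is never used).
def remove_every_other (my_list : List Int) : List Int :=
  (my_list.foldl
    (fun (st : Int × List Int) (_item : Int) =>
      (st.1 + 1, if st.1 % 2 == 0 then st.2 ++ [PySem.List.pyGetD my_list st.1 0] else st.2))
    (0, [])).2

-- ===== PORT B =====
-- Port of B: list(my_list[::2]) as the step slice; slice? is some since step 2 ≠ 0,
-- so the getD default [] is never used.
def remove_every_other_alt (my_list : List Int) : List Int :=
  (PySem.List.slice? my_list none none 2).getD []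

-- ===== PRECONDITION & SPEC =====
def Spec_remove_every_other (my_list : List Int) (out : List Int) : Prop := out = remove_every_other_alt my_list
instance (my_list : List Int) (out : List Int) : Decidable (Spec_remove_every_other my_list out) := by unfold Spec_remove_every_other; infer_instance

-- ===== CLAIM (what is proved, stated in full; the proofs are below) =====
def Claim_equal_remove_every_other : Prop := ∀ (my_list : List Int), Dom_remove_every_other my_list → Spec_remove_every_other my_list (remove_every_other my_list)

-- ===== LEMMAS AND PROOFS =====

-- Elements at even (resp. odd, when the flag is false) positions.
def pvSel (ev : Bool) : List Int → List Int
  | [] => []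
  | a :: t => if ev then a :: pvSel false t else pvSel true t

theorem pvSel_filterMap : ∀ (xs : List Int),
    List.filterMap (fun k => xs[2 * k]?) (List.range ((xs.length + 1) / 2)) = pvSel true xs
  | [] => by simp [pvSel]
  | [a] => by simp [pvSel, List.range_succ]
  | a :: b :: t => by
    have hc : ((a :: b :: t).length + 1) / 2 = (t.length + 1) / 2 + 1 := by
      simp only [List.length_cons]; omega
    rw [hc, List.range_succ_eq_map, List.filterMap_cons, List.filterMap_map]
    have h0 : (a :: b :: t)[2 * 0]? = some a := by simp
    rw [h0]
    have hs : (fun k => (a :: b :: t)[2 * k]?) ∘ Nat.succ = fun k => t[2 * k]? := by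
      funext k
      show (a :: b :: t)[2 * (k + 1)]? = t[2 * k]?
      have : 2 * (k + 1) = 2 * k + 1 + 1 := by omega
      rw [this]; simp
    rw [hs, pvSel_filterMap t]
    simp [pvSel]

theorem pvSlice_eq (xs : List Int) :
    PySem.List.slice? xs none none 2 = some (pvSel true xs) := by
  simp only [PySem.List.slice?, PySem.List.sliceIndices]
  norm_num
  rw [show (if 0 < xs.length then (((xs.length : Int) + 2 - 1) / 2).toNat else 0)
        = (xs.length + 1) / 2 by split <;> omega]
  rw [show (fun (x : Nat) => xs[(2 * (x : Int)).toNat]?) = fun k => xs[2 * k]? by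
    funext k
    rw [show ((2 : Int) * (k : Int)).toNat = 2 * k by omega]]
  exact pvSel_filterMap xs

theorem pvFold_inv (my_list : List Int) : ∀ (l : List Int) (i : Nat) (acc : List Int),
    my_list.drop i = l →
    (List.foldl
      (fun (st : Int × List Int) (_item : Int) =>
        (st.1 + 1, if st.1 % 2 == 0 then st.2 ++ [PySem.List.pyGetD my_list st.1 0] else st.2))
      ((i : Int), acc) l).2 = acc ++ pvSel (i % 2 == 0) l
  | [], i, acc, _ => by simp [pvSel]
  | a :: t, i, acc, h => by
    have hget : PySem.List.pyGetD my_list (i : Int) 0 = a := by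
      rw [PySem.List.pyGetD_natCast]
      have hh : my_list[i]? = some a := by
        have := congrArg (fun l => l.head?) h
        simpa [List.head?_drop] using this
      rw [List.getD_eq_getElem?_getD, hh, Option.getD_some]
    have hdrop : my_list.drop (i + 1) = t := by
      have := congrArg List.tail h
      rwa [List.tail_drop, List.tail_cons] at this
    simp only [List.foldl_cons]
    rw [show ((i : Int) + 1) = ((i + 1 : Nat) : Int) by push_cast; ring]
    by_cases hp : i % 2 = 0
    · have h1 : ((i : Int) % 2 == 0) = true := by simp only [beq_iff_eq]; omega
      have h2 : (((i + 1) % 2 : Nat) == 0) = false := by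
        simp only [beq_eq_false_iff_ne, ne_eq]; omega
      have h3 : ((i % 2 : Nat) == 0) = true := by simp [hp]
      rw [h1, if_pos rfl, hget, pvFold_inv my_list t (i + 1) (acc ++ [a]) hdrop, h2, h3]
      simp [pvSel]
    · have h1 : ((i : Int) % 2 == 0) = false := by
        simp only [beq_eq_false_iff_ne, ne_eq]; omega
      have h2 : (((i + 1) % 2 : Nat) == 0) = true := by simp only [beq_iff_eq]; omega
      have h3 : ((i % 2 : Nat) == 0) = false := by simp [hp]
      rw [h1, if_neg (by simp), pvFold_inv my_list t (i + 1) acc hdrop, h2, h3]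
      simp [pvSel]

-- ===== VERDICT (by name: the statement is the Claim_ definition above) =====
theorem remove_every_other_spec : Claim_equal_remove_every_other := by
  intro my_list _
  unfold Spec_remove_every_other remove_every_other remove_every_other_alt
  rw [pvSlice_eq, Option.getD_some]
  have := pvFold_inv my_list my_list 0 [] (by simp)
  simpa using this
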